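-- pv_equiv track=rewrite | github.com/alex-coded/Software-Evolution-Assignments-UvA | Series 2/Series2/Visualization/parser/circle_packer.py | find_starting_point
-- ===== SOURCE A (Python) =====
-- def find_starting_point(paths):
--     folder_counts = {}
--     for path, _ in paths:
--         parts = path.split('/')
--         if len(parts) > 2:
--             folder = parts[1]
--             folder_counts[folder] = folder_counts.get(folder, 0) + 1
--
--     for folder, count in folder_counts.items():
--         if count > 1:
--             return folder
--     return None
-- ===== SOURCE B (Python) =====
-- def find_starting_point(paths):
--     folders = []
--     for path, _ in paths:
--         parts = path.split('/')
--         if len(parts) > 2: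
--             folders.append(parts[1])
--     s = sorted(folders)
--     dups = {a for a, b in zip(s, s[1:]) if a == b}
--     for f in folders:
--         if f in dups:
--             return f
--     return None
-- ===== Notes on version B (the rewrite author's own statement) =====
-- stated objective: alternative
-- what changed: Replaces A's count-dictionary-then-items-scan by a sort-based algorithm: sort the second-level folder names, detect duplicated names as adjacent equal pairs in the sorted list, and return the first original-order name in that duplicate set.
import Mathlib
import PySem

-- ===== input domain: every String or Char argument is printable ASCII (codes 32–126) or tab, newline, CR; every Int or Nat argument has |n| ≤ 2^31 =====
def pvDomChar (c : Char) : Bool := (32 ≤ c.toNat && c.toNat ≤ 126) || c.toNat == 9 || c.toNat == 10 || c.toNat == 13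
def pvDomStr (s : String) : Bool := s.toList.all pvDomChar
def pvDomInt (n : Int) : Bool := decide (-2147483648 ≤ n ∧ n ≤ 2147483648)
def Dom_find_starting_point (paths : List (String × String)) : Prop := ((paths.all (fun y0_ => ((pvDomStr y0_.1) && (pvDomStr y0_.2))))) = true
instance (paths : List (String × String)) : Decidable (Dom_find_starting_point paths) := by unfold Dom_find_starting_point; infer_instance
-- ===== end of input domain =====

-- B replaces A's count-dictionary by a sort-based algorithm (sort the folder names, collect
-- adjacent equal pairs as the duplicate set, scan the original order for the first member).

-- ===== PORT A =====
-- the second for-loop of A with its early return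
def scanItemsA : List (String × Int) → Option String
  | [] => none
  | (folder, count) :: rest => if count > 1 then some folder else scanItemsA rest

def find_starting_point (paths : List (String × String)) : Option String :=
  let folder_counts := paths.foldl (fun d pq =>
    let parts := (PySem.Str.split? pq.1 "/").getD []
    if parts.length > 2 then
      let folder := PySem.List.pyGetD parts 1 ""   -- parts[1]: in range since len(parts) > 2
      d.insert folder (d.getD folder 0 + 1)
    else d) PySem.Dict.empty
  scanItemsA folder_counts.items

-- ===== PORT B =====
-- the final for-loop of B with its early return ('if f in dups: return f')
def scanInB (dups : PySem.Set String) : List String → Option String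
  | [] => none
  | f :: rest => if PySem.Set.contains dups f then some f else scanInB dups rest

def find_starting_point_alt (paths : List (String × String)) : Option String :=
  let folders := paths.foldl (fun acc pq =>
    let parts := (PySem.Str.split? pq.1 "/").getD []
    if parts.length > 2 then acc ++ [PySem.List.pyGetD parts 1 ""] else acc) []
  let s := PySem.List.sorted folders (fun x => x) false
  let dups : PySem.Set String := PySem.Set.ofList
    ((s.zip (PySem.List.slice s (some 1))).filterMap
      (fun ab => if ab.1 == ab.2 then some ab.1 else none))
  scanInB dups folders

-- ===== PRECONDITION & SPEC =====
def Spec_find_starting_point (paths : List (String × String)) (out : Option String) : Prop := out = find_starting_point_alt paths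
instance (paths : List (String × String)) (out : Option String) : Decidable (Spec_find_starting_point paths out) := by unfold Spec_find_starting_point; infer_instance

-- ===== CLAIM (what is proved, stated in full; the proofs are below) =====
def Claim_equal_find_starting_point : Prop := ∀ (paths : List (String × String)), Dom_find_starting_point paths → Spec_find_starting_point paths (find_starting_point paths)

-- ===== LEMMAS AND PROOFS =====

-- the list of second-level folder names, in path order (both ports reduce to it)
def pvFolders (paths : List (String × String)) : List String :=
  (paths.filter (fun pq => ((PySem.Str.split? pq.1 "/").getD []).length > 2)).map
    (fun pq => PySem.List.pyGetD ((PySem.Str.split? pq.1 "/").getD []) 1 "")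

-- adjacent equal pairs of a list (what B's zip comprehension collects)
def pvAdjDups : List String → List String :=
  fun s => (s.zip (s.drop 1)).filterMap (fun ab => if ab.1 == ab.2 then some ab.1 else none)

theorem scanItemsA_eq_find? (l : List (String × Int)) :
    scanItemsA l = (l.find? (fun kc => kc.2 > 1)).map (·.1) := by
  induction l with
  | nil => rfl
  | cons kc rest ih =>
    obtain ⟨k, c⟩ := kc
    by_cases h : c > 1
    · rw [scanItemsA, if_pos h, List.find?_cons_of_pos (by simpa using h)]
      rfl
    · rw [scanItemsA, if_neg h, List.find?_cons_of_neg (by simpa using h), ih]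

theorem scanInB_eq_find? (dups : PySem.Set String) (l : List String) :
    scanInB dups l = l.find? (fun f => PySem.Set.contains dups f) := by
  induction l with
  | nil => rfl
  | cons f rest ih =>
    by_cases h : PySem.Set.contains dups f
    · rw [scanInB, if_pos h, List.find?_cons_of_pos (by simpa using h)]
    · rw [scanInB, if_neg h, List.find?_cons_of_neg (by simpa using h), ih]

theorem foldA_eq_counter (paths : List (String × String)) :
    paths.foldl (fun d pq =>
      let parts := (PySem.Str.split? pq.1 "/").getD []
      if parts.length > 2 then
        let folder := PySem.List.pyGetD parts 1 ""
        d.insert folder (d.getD folder 0 + 1)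
      else d) PySem.Dict.empty
    = PySem.Dict.counter (pvFolders paths) := by
  have h1 : paths.foldl (fun d pq =>
      let parts := (PySem.Str.split? pq.1 "/").getD []
      if parts.length > 2 then
        let folder := PySem.List.pyGetD parts 1 ""
        d.insert folder (d.getD folder 0 + 1)
      else d) (PySem.Dict.empty : PySem.Dict String Int)
      = paths.foldl (fun d pq =>
        if (decide (((PySem.Str.split? pq.1 "/").getD []).length > 2)) = true then
          d.insert (PySem.List.pyGetD ((PySem.Str.split? pq.1 "/").getD []) 1 "")
            (d.getD (PySem.List.pyGetD ((PySem.Str.split? pq.1 "/").getD []) 1 "") 0 + 1)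
        else d) (PySem.Dict.empty : PySem.Dict String Int) :=
by
    refine PySem.List.foldl_congr_mem _ _ _ _ (fun acc pq _ => ?_)
    by_cases h : ((PySem.Str.split? pq.1 "/").getD []).length > 2 <;> simp [h]
  refine h1.trans ?_
  rw [PySem.List.foldl_if_eq_foldl_filter]
  have h2 : PySem.Dict.counter (pvFolders paths)
      = (paths.filter (fun pq => decide (((PySem.Str.split? pq.1 "/").getD []).length > 2))).foldl
        (fun (d : PySem.Dict String Int) pq =>
          d.insert (PySem.List.pyGetD ((PySem.Str.split? pq.1 "/").getD []) 1 "")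
            (d.getD (PySem.List.pyGetD ((PySem.Str.split? pq.1 "/").getD []) 1 "") 0 + 1))
        PySem.Dict.empty := by
    rw [← PySem.Dict.foldl_insert_getD_add_one_eq_counter, pvFolders, List.foldl_map]
  exact h2.symm

theorem foldB_eq_folders (paths : List (String × String)) :
    paths.foldl (fun acc pq =>
      let parts := (PySem.Str.split? pq.1 "/").getD []
      if parts.length > 2 then acc ++ [PySem.List.pyGetD parts 1 ""] else acc) []
    = pvFolders paths := by
  have h1 : paths.foldl (fun acc pq =>
      let parts := (PySem.Str.split? pq.1 "/").getD []
      if parts.length > 2 then acc ++ [PySem.List.pyGetD parts 1 ""] else acc) []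
      = paths.foldl (fun acc pq =>
        if (decide (((PySem.Str.split? pq.1 "/").getD []).length > 2)) = true then
          acc ++ [PySem.List.pyGetD ((PySem.Str.split? pq.1 "/").getD []) 1 ""]
        else acc) [] :=
by
    refine PySem.List.foldl_congr_mem _ _ _ _ (fun acc pq _ => ?_)
    by_cases h : ((PySem.Str.split? pq.1 "/").getD []).length > 2 <;> simp [h]
  refine h1.trans ?_
  rw [PySem.List.foldl_append_if, pvFolders, List.nil_append]

-- an element of the adjacent-dup list is an element of the list
theorem mem_of_mem_pvAdjDups {s : List String} {x : String} (h : x ∈ pvAdjDups s) : x ∈ s := by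
  simp only [pvAdjDups, List.mem_filterMap] at h
  obtain ⟨⟨a, b⟩, hab, hx⟩ := h
  have := List.of_mem_zip hab
  by_cases hEq : a == b
  · simp [hEq] at hx; exact hx ▸ this.1
  · simp [hEq] at hx

theorem mem_pvAdjDups_iff_count (s : List String) (hs : s.Pairwise (· ≤ ·)) (x : String) :
    x ∈ pvAdjDups s ↔ 2 ≤ s.count x := by
  induction s with
  | nil => simp [pvAdjDups]
  | cons a t ih =>
    cases t with
    | nil =>
      simp only [pvAdjDups, List.drop_one, List.tail_cons, List.zip_nil_right,
        List.filterMap_nil, List.not_mem_nil, false_iff, not_le, List.count_cons,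
        List.count_nil]
      split <;> omega
    | cons b u =>
      have hab : a ≤ b := (List.pairwise_cons.mp hs).1 b (by simp)
      have hs' : (b :: u).Pairwise (· ≤ ·) := (List.pairwise_cons.mp hs).2
      have ih' := ih hs'
      have key : pvAdjDups (a :: b :: u) = (if a = b then [a] else []) ++ pvAdjDups (b :: u) := by
        by_cases hEq : a = b <;> simp [pvAdjDups, hEq]
      rw [key]
      by_cases hEq : a = b
      · by_cases hx : x = a
        · subst hx; subst hEq
          simp
        · have hcc : List.count x (a :: b :: u) = List.count x (b :: u) :=
            List.count_cons_of_ne (fun h => hx h.symm)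
          simp only [if_pos hEq, List.mem_append, List.mem_singleton, hx, false_or, ih', hcc]
      · by_cases hx : x = a
        · subst hx
          have hnotmem : x ∉ (b :: u) := by
            intro hm
            rcases List.mem_cons.mp hm with h | h
            · exact hEq h
            · exact hEq (le_antisymm hab ((List.pairwise_cons.mp hs').1 x h))
          have hc0 : List.count x (b :: u) = 0 := List.count_eq_zero.mpr hnotmem
          simp only [if_neg hEq, List.nil_append, List.count_cons_self, hc0]
          constructor
          · intro hmem; exact absurd (mem_of_mem_pvAdjDups hmem) hnotmem
          · omega
        · have hcc : List.count x (a :: b :: u) = List.count x (b :: u) :=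
            List.count_cons_of_ne (fun h => hx h.symm)
          simp only [if_neg hEq, List.nil_append, ih', hcc]

-- a Set.add fold only ever appends to its accumulator
theorem foldl_add_append {α : Type} [BEq α] (xs : List α) (s : PySem.Set α) :
    ∃ t, xs.foldl PySem.Set.add s = s ++ t := by
  induction xs generalizing s with
  | nil => exact ⟨[], by simp⟩
  | cons a xs ih =>
    simp only [List.foldl, PySem.Set.add]
    cases h : PySem.Set.contains s a
    · obtain ⟨t, ht⟩ := ih (s ++ [a])
      exact ⟨a :: t, by simp [ht]⟩
    · obtain ⟨t, ht⟩ := ih s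
      exact ⟨t, by simp [ht]⟩

-- scanning the deduplicated accumulator finds the same first hit as scanning the raw list
theorem find?_foldl_add {α : Type} [BEq α] [LawfulBEq α] (p : α → Bool)
    (xs : List α) (s : PySem.Set α) (hs : ∀ y ∈ s, p y = false) :
    List.find? p (xs.foldl PySem.Set.add s) = List.find? p xs := by
  induction xs generalizing s with
  | nil => simpa using List.find?_eq_none.mpr (fun x hx => by simp [hs x hx])
  | cons a xs ih =>
    simp only [List.foldl]
    by_cases hp : p a
    · have ha : a ∉ s := fun hmem => by simp [hs a hmem] at hp
      have hadd : PySem.Set.add s a = s ++ [a] := by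
        simp [PySem.Set.add, PySem.Set.contains, ha]
      obtain ⟨t, ht⟩ := foldl_add_append xs (s ++ [a])
      rw [hadd, ht, List.find?_cons_of_pos hp, List.append_assoc, List.find?_append,
        List.find?_eq_none.mpr (fun x hx => by simp [hs x hx])]
      simp [List.find?_cons_of_pos hp]
    · simp only [Bool.not_eq_true] at hp
      rw [List.find?_cons_of_neg (by simp [hp])]
      by_cases hc : a ∈ s
      · have : PySem.Set.add s a = s := by
          simp [PySem.Set.add, PySem.Set.contains, hc]
        rw [this]; exact ih s hs
      · have : PySem.Set.add s a = s ++ [a] := by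
          simp [PySem.Set.add, PySem.Set.contains, hc]
        rw [this]
        refine ih (s ++ [a]) (fun y hy => ?_)
        rcases List.mem_append.mp hy with h | h
        · exact hs y h
        · simp only [List.mem_singleton] at h
          simpa [h] using hp

theorem find?_ofList {α : Type} [BEq α] [LawfulBEq α] (p : α → Bool) (xs : List α) :
    List.find? p (PySem.Set.ofList xs) = List.find? p xs := by
  rw [PySem.Set.ofList_eq_foldl]
  exact find?_foldl_add p xs [] (by simp)

-- ===== VERDICT (by name: the statement is the Claim_ definition above) =====
theorem find_starting_point_spec : Claim_equal_find_starting_point := by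
  intro paths _
  unfold Spec_find_starting_point find_starting_point find_starting_point_alt
  rw [foldA_eq_counter, foldB_eq_folders, scanItemsA_eq_find?, scanInB_eq_find?,
    PySem.Dict.items_counter, List.find?_map]
  have hslice : PySem.List.slice (PySem.List.sorted (pvFolders paths) (fun x => x) false)
      (some 1) = (PySem.List.sorted (pvFolders paths) (fun x => x) false).drop 1 :=
    PySem.List.slice_from _ (by norm_num)
  have hcount : ∀ x, List.count x (PySem.List.sorted (pvFolders paths) (fun x => x) false)
      = List.count x (pvFolders paths) :=
    fun x => (PySem.List.sorted_perm (pvFolders paths) (fun x => x) false).count_eq x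
  have hpred : ((fun (kc : String × Int) => decide (kc.2 > 1)) ∘
      (fun k => (k, (List.count k (pvFolders paths) : Int))))
      = (fun f => PySem.Set.contains (PySem.Set.ofList
          (pvAdjDups (PySem.List.sorted (pvFolders paths) (fun x => x) false))) f) := by
    funext k
    have hmem : k ∈ PySem.Set.ofList
        (pvAdjDups (PySem.List.sorted (pvFolders paths) (fun x => x) false))
        ↔ 2 ≤ List.count k (pvFolders paths) := by
      rw [PySem.Set.mem_ofList,
        mem_pvAdjDups_iff_count _ (PySem.List.sorted_pairwise (pvFolders paths) (fun x => x)) k,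
        hcount]
    simp only [Function.comp_apply, PySem.Set.contains]
    by_cases h : 2 ≤ List.count k (pvFolders paths)
    · simp [hmem.mpr h]
      omega
    · have : k ∉ PySem.Set.ofList
          (pvAdjDups (PySem.List.sorted (pvFolders paths) (fun x => x) false)) :=
        fun hm => h (hmem.mp hm)
      simp [this]
      omega
  rw [hslice]
  have : ((PySem.List.sorted (pvFolders paths) (fun x => x) false).zip
      ((PySem.List.sorted (pvFolders paths) (fun x => x) false).drop 1)).filterMap
      (fun ab => if ab.1 == ab.2 then some ab.1 else none)
      = pvAdjDups (PySem.List.sorted (pvFolders paths) (fun x => x) false) := rfl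
  rw [this, hpred, find?_ofList]
  cases List.find? _ (pvFolders paths) <;> rfl
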